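-- pv_equiv track=rewrite | github.com/AlejandroE207/MachineLearning | Trabajo 1/convertir_datos.py | clasificar_url_5r
-- ===== SOURCE A (Python) =====
-- def clasificar_url_5r(url):
--     url = str(url).lower()
--     muy_sospechosos = ["phishing", "malicious", "freegift", "getprize", "lottery", ".xyz", ".biz", ".io", ".co", ".win"]
--     sospechosos = ["secure-login", "freemoney", "discountzone", "investcrypto", "promo"]
--     neutro = [".com", ".org", ".net", "bank", "offer"]
--
--     if any(s in url for s in muy_sospechosos):
--         return 5
--     elif any(s in url for s in sospechosos):
--         return 4
--     elif any(s in url for s in neutro):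
--         return 3
--     elif len(url) < 15:
--         return 2
--     else:
--         return 1
-- ===== SOURCE B (Python) =====
-- def clasificar_url_5r(url):
--     u = str(url).lower()
--     tabla = [
--         ("phishing", 5), ("malicious", 5), ("freegift", 5), ("getprize", 5), ("lottery", 5),
--         (".xyz", 5), (".biz", 5), (".io", 5), (".co", 5), (".win", 5),
--         ("secure-login", 4), ("freemoney", 4), ("discountzone", 4), ("investcrypto", 4), ("promo", 4),
--         (".com", 3), (".org", 3), (".net", 3), ("bank", 3), ("offer", 3),
--     ]
--     # index the keywords by their first character
--     por_inicial = {}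
--     for k, v in tabla:
--         por_inicial.setdefault(k[0], []).append((k, v))
--     # single left-to-right scan over the url positions; at each position only the
--     # keywords whose first character matches are tried, keeping the best score seen
--     mejor = 0
--     for i, ch in enumerate(u):
--         for k, v in por_inicial.get(ch, []):
--             if v > mejor and u.startswith(k, i):
--                 mejor = v
--     if mejor > 0:
--         return mejor
--     return 2 if len(u) < 15 else 1
-- ===== Notes on version B (the rewrite author's own statement) =====
-- stated objective: alternative
-- what changed: Instead of testing each keyword for substring containment in three ordered any() passes, B indexes the 20 scored keywords by first character and makes one left-to-right scan over the url positions, at each position trying only the keywords whose first character matches and keeping the best score; the length fallback fires only when no keyword matched anywhere.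
import Mathlib
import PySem

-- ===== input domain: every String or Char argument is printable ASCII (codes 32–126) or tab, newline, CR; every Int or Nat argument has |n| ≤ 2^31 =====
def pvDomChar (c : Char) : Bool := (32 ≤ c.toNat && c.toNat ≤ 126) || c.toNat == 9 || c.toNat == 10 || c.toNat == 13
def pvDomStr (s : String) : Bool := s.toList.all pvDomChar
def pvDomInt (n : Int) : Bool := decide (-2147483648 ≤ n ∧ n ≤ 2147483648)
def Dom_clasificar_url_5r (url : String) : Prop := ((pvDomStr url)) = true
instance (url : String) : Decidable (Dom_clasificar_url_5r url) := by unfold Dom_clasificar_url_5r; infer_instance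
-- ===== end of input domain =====

-- B replaces A's three ordered any() substring checks by a first-character index over the
-- scored keywords and ONE left-to-right scan over the url positions, keeping the best score
-- (alternative decomposition, same asymptotic cost).


-- ===== PORT A =====
def pvMuySospechosos : List String := ["phishing", "malicious", "freegift", "getprize", "lottery", ".xyz", ".biz", ".io", ".co", ".win"]
def pvSospechosos : List String := ["secure-login", "freemoney", "discountzone", "investcrypto", "promo"]
def pvNeutro : List String := [".com", ".org", ".net", "bank", "offer"]

def clasificar_url_5r (url : String) : Int :=
  let u := PySem.Str.lower url
  if pvMuySospechosos.any (fun s => PySem.Str.isIn s u) then 5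
  else if pvSospechosos.any (fun s => PySem.Str.isIn s u) then 4
  else if pvNeutro.any (fun s => PySem.Str.isIn s u) then 3
  else if PySem.Str.len u < 15 then 2
  else 1

-- ===== PORT B =====
-- Source B's tabla (keys kept as code-point lists, the form the scan reads them in)
def pvTabla : List (List Char × Int) :=
  [("phishing".toList, 5), ("malicious".toList, 5), ("freegift".toList, 5), ("getprize".toList, 5), ("lottery".toList, 5),
   (".xyz".toList, 5), (".biz".toList, 5), (".io".toList, 5), (".co".toList, 5), (".win".toList, 5),
   ("secure-login".toList, 4), ("freemoney".toList, 4), ("discountzone".toList, 4), ("investcrypto".toList, 4), ("promo".toList, 4),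
   (".com".toList, 3), (".org".toList, 3), (".net".toList, 3), ("bank".toList, 3), ("offer".toList, 3)]

-- por_inicial.setdefault(k[0], []).append((k, v)) = modify k[0] [] (· ++ [(k, v)]);
-- k[0] ported as headI, exact here since every key of tabla is nonempty
def pvPorInicial : PySem.Dict Char (List (List Char × Int)) :=
  pvTabla.foldl (fun d p => d.modify p.1.headI [] (· ++ [p])) PySem.Dict.empty

-- the scan loop: for i, ch in enumerate(u): for k, v in por_inicial.get(ch, []): …
-- u.startswith(k, i) ported as startswith on u.drop i — exact, i is a non-negative in-range enumerate index
def pvScan (u : List Char) : Int :=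
  (PySem.List.enumerate u).foldl
    (fun m ic =>
      (pvPorInicial.getD ic.2 []).foldl
        (fun m p => if decide (m < p.2) && PySem.Chars.startswith (u.drop ic.1.toNat) p.1 then p.2 else m) m) 0

def clasificar_url_5r_alt (url : String) : Int :=
  let u := (PySem.Str.lower url).toList
  let mejor := pvScan u
  if 0 < mejor then mejor
  else if PySem.Chars.len u < 15 then 2
  else 1

-- ===== PRECONDITION & SPEC =====
def Spec_clasificar_url_5r (url : String) (out : Int) : Prop := out = clasificar_url_5r_alt url
instance (url : String) (out : Int) : Decidable (Spec_clasificar_url_5r url out) := by unfold Spec_clasificar_url_5r; infer_instance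

-- ===== CLAIM (what is proved, stated in full; the proofs are below) =====
def Claim_equal_clasificar_url_5r : Prop := ∀ (url : String), Dom_clasificar_url_5r url → Spec_clasificar_url_5r url (clasificar_url_5r url)

-- ===== LEMMAS AND PROOFS =====

-- headI of a nonempty list is its first element
theorem pv_headI_eq (l : List Char) (h : l ≠ []) : l.headI = l[0]'(List.length_pos_iff.mpr h) := by
  cases l with
  | nil => exact absurd rfl h
  | cons a t => rfl

-- the guarded update 'if v > m and startswith then v else m' is 'if startswith then max m v else m'
theorem pv_step_eq (u : List Char) (i : Nat) (m : Int) (p : List Char × Int) :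
    (if decide (m < p.2) && PySem.Chars.startswith (u.drop i) p.1 then p.2 else m)
      = if PySem.Chars.startswith (u.drop i) p.1 then max m p.2 else m := by
  by_cases h : PySem.Chars.startswith (u.drop i) p.1 <;>
    by_cases hm : m < p.2 <;> simp [h, hm] <;> omega

-- a nested foldl is a foldl over the flattened (outer, inner) pairs
theorem pv_flatten {α β : Type} (l : List α) (h : α → List β) (g : α → Int → β → Int) (m : Int) :
    l.foldl (fun m a => (h a).foldl (g a) m) m
      = (l.flatMap (fun a => (h a).map (fun b => (a, b)))).foldl (fun m t => g t.1 m t.2) m := by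
  induction l generalizing m with
  | nil => rfl
  | cons a l ih => simp [List.foldl_append, List.foldl_map, ih]

theorem pv_fold_le {α : Type} (q : α → Bool) (w : α → Int) (l : List α) (m : Int) :
    m ≤ l.foldl (fun m a => if q a then max m (w a) else m) m := by
  induction l generalizing m with
  | nil => exact le_refl m
  | cons a l ih =>
      simp only [List.foldl_cons]
      refine le_trans ?_ (ih (if q a = true then max m (w a) else m))
      split <;> simp

theorem pv_fold_ge {α : Type} (q : α → Bool) (w : α → Int) (l : List α) (m : Int)
    (a : α) (ha : a ∈ l) (hq : q a = true) :
    w a ≤ l.foldl (fun m a => if q a then max m (w a) else m) m := by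
  induction l generalizing m with
  | nil => cases ha
  | cons x l ih =>
      rcases List.mem_cons.mp ha with rfl | hmem
      · refine le_trans ?_ (pv_fold_le q w l _)
        simp [hq]
      · exact ih _ hmem

theorem pv_fold_cases {α : Type} (q : α → Bool) (w : α → Int) (l : List α) (m : Int) :
    l.foldl (fun m a => if q a then max m (w a) else m) m = m
      ∨ ∃ a ∈ l, q a = true ∧ l.foldl (fun m a => if q a then max m (w a) else m) m = w a := by
  induction l generalizing m with
  | nil => exact Or.inl rfl
  | cons x l ih =>
      simp only [List.foldl_cons]
      rcases ih (if q x then max m (w x) else m) with h | ⟨a, ha, hq, h⟩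
      · by_cases hx : q x
        · rcases max_choice m (w x) with hmx | hmx
          · exact Or.inl (by rw [h, if_pos hx, hmx])
          · exact Or.inr ⟨x, by simp, hx, by rw [h, if_pos hx, hmx]⟩
        · exact Or.inl (by rw [h, if_neg hx])
      · exact Or.inr ⟨a, by simp [ha], hq, h⟩

-- pvPorInicial as a fold over key-tagged pairs, the shape of Dict.getD_foldl_modify_append
theorem pv_por_eq : pvPorInicial
    = (pvTabla.map (fun p => (p.1.headI, p))).foldl
        (fun d q => d.modify q.1 [] (· ++ [q.2])) PySem.Dict.empty := by
  rw [List.foldl_map]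
  rfl

-- the first-character index: bucket c holds exactly the table entries whose key starts with c
theorem pv_bucket (c : Char) :
    pvPorInicial.getD c [] = pvTabla.filter (fun p => p.1.headI == c) := by
  rw [pv_por_eq, PySem.Dict.getD_foldl_modify_append]
  simp [List.filter_map, Function.comp_def]

-- facts about the concrete table
theorem pv_tabla_ne : ∀ p ∈ pvTabla, p.1 ≠ [] := by decide
theorem pv_tabla_vals : ∀ p ∈ pvTabla, p.2 = 5 ∨ p.2 = 4 ∨ p.2 = 3 := by decide
theorem pv_tabla_5 : ∀ p ∈ pvTabla, p.2 = 5 → p.1 ∈ pvMuySospechosos.map String.toList := by decide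
theorem pv_tabla_4 : ∀ p ∈ pvTabla, p.2 = 4 → p.1 ∈ pvSospechosos.map String.toList := by decide
theorem pv_tabla_3 : ∀ p ∈ pvTabla, p.2 = 3 → p.1 ∈ pvNeutro.map String.toList := by decide
theorem pv_muy_mem : ∀ s ∈ pvMuySospechosos, (s.toList, (5 : Int)) ∈ pvTabla := by decide
theorem pv_sos_mem : ∀ s ∈ pvSospechosos, (s.toList, (4 : Int)) ∈ pvTabla := by decide
theorem pv_neu_mem : ∀ s ∈ pvNeutro, (s.toList, (3 : Int)) ∈ pvTabla := by decide

-- the scan as a flat guarded-max fold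
theorem pv_scan_eq (u : List Char) :
    pvScan u = ((PySem.List.enumerate u).flatMap
        (fun ic => (pvPorInicial.getD ic.2 []).map (fun p => (ic, p)))).foldl
      (fun m t => if PySem.Chars.startswith (u.drop t.1.1.toNat) t.2.1 then max m t.2.2 else m) 0 := by
  unfold pvScan
  rw [pv_flatten]
  simp only [pv_step_eq]

theorem pv_scan_ge (u : List Char) (p : List Char × Int) (hp : p ∈ pvTabla)
    (hm : PySem.Chars.isIn p.1 u = true) : p.2 ≤ pvScan u := by
  obtain ⟨j, hj⟩ := (PySem.Chars.exists_prefix_drop_iff_isIn p.1 u).mpr hm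
  have hne : p.1 ≠ [] := pv_tabla_ne p hp
  have hjlt : j < u.length := by
    by_contra hge
    have : u.drop j = [] := List.drop_eq_nil_of_le (by omega)
    rw [this] at hj
    exact hne (List.prefix_nil.mp hj)
  have hplen : 0 < p.1.length := List.length_pos_iff.mpr hne
  have hhead : p.1.headI = u[j] := by
    have h0 : u[j] = (u.drop j)[0]'(by simp; omega) := by simp
    rw [h0, pv_headI_eq p.1 hne]
    exact hj.getElem hplen
  rw [pv_scan_eq]
  refine pv_fold_ge _ _ _ 0 (((j : Int), u[j]), p) ?_ ?_
  · refine List.mem_flatMap.mpr ⟨((j : Int), u[j]), ?_, ?_⟩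
    · exact (PySem.List.mem_enumerate_iff _ _ _).mpr ⟨j, hjlt, by simp⟩
    · refine List.mem_map.mpr ⟨p, ?_, rfl⟩
      rw [pv_bucket]
      exact List.mem_filter.mpr ⟨hp, by simp [hhead]⟩
  · simpa using (PySem.Chars.startswith_iff _ _).mpr hj

theorem pv_scan_cases (u : List Char) :
    pvScan u = 0 ∨ ∃ p ∈ pvTabla, PySem.Chars.isIn p.1 u = true ∧ pvScan u = p.2 := by
  rw [pv_scan_eq]
  rcases pv_fold_cases
      (fun t : (Int × Char) × (List Char × Int) => PySem.Chars.startswith (u.drop t.1.1.toNat) t.2.1)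
      (fun t : (Int × Char) × (List Char × Int) => t.2.2) _ 0 with h | ⟨t, ht, hq, h⟩
  · exact Or.inl h
  · obtain ⟨ic, _, hmap⟩ := List.mem_flatMap.mp ht
    obtain ⟨p, hpb, rfl⟩ := List.mem_map.mp hmap
    rw [pv_bucket] at hpb
    refine Or.inr ⟨p, (List.mem_filter.mp hpb).1, ?_, h⟩
    exact (PySem.Chars.exists_prefix_drop_iff_isIn p.1 u).mp
      ⟨ic.1.toNat, (PySem.Chars.startswith_iff _ _).mp hq⟩

-- ===== VERDICT (by name: the statement is the Claim_ definition above) =====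
theorem clasificar_url_5r_spec : Claim_equal_clasificar_url_5r := by
  intro url _
  unfold Spec_clasificar_url_5r clasificar_url_5r clasificar_url_5r_alt
  simp only [PySem.Str.isIn_eq, PySem.Str.len_eq]
  set U := (PySem.Str.lower url).toList with hU
  by_cases h1 : pvMuySospechosos.any (fun s => PySem.Chars.isIn s.toList U)
  · obtain ⟨s, hs, hin⟩ := List.any_eq_true.mp h1
    have h5 : 5 ≤ pvScan U := pv_scan_ge U (s.toList, 5) (pv_muy_mem s hs) hin
    have hR : pvScan U = 5 := by
      rcases pv_scan_cases U with h | ⟨p, hp, _, h⟩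
      · omega
      · rcases pv_tabla_vals p hp with h2 | h2 | h2 <;> omega
    rw [if_pos h1, hR]
    norm_num
  · have hno5 : ∀ p ∈ pvTabla, PySem.Chars.isIn p.1 U = true → p.2 ≠ 5 := by
      intro p hp hin h5
      obtain ⟨s, hs, heq⟩ := List.mem_map.mp (pv_tabla_5 p hp h5)
      rw [← heq] at hin
      exact h1 (List.any_eq_true.mpr ⟨s, hs, hin⟩)
    by_cases h2 : pvSospechosos.any (fun s => PySem.Chars.isIn s.toList U)
    · obtain ⟨s, hs, hin⟩ := List.any_eq_true.mp h2
      have h4 : 4 ≤ pvScan U := pv_scan_ge U (s.toList, 4) (pv_sos_mem s hs) hin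
      have hR : pvScan U = 4 := by
        rcases pv_scan_cases U with h | ⟨p, hp, hpin, h⟩
        · omega
        · rcases pv_tabla_vals p hp with hv | hv | hv
          · exact absurd hv (hno5 p hp hpin)
          · omega
          · omega
      rw [if_neg h1, if_pos h2, hR]
      norm_num
    · have hno4 : ∀ p ∈ pvTabla, PySem.Chars.isIn p.1 U = true → p.2 ≠ 4 := by
        intro p hp hin h4
        obtain ⟨s, hs, heq⟩ := List.mem_map.mp (pv_tabla_4 p hp h4)
        rw [← heq] at hin
        exact h2 (List.any_eq_true.mpr ⟨s, hs, hin⟩)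
      by_cases h3 : pvNeutro.any (fun s => PySem.Chars.isIn s.toList U)
      · obtain ⟨s, hs, hin⟩ := List.any_eq_true.mp h3
        have hge : 3 ≤ pvScan U := pv_scan_ge U (s.toList, 3) (pv_neu_mem s hs) hin
        have hR : pvScan U = 3 := by
          rcases pv_scan_cases U with h | ⟨p, hp, hpin, h⟩
          · omega
          · rcases pv_tabla_vals p hp with hv | hv | hv
            · exact absurd hv (hno5 p hp hpin)
            · exact absurd hv (hno4 p hp hpin)
            · omega
        rw [if_neg h1, if_neg h2, if_pos h3, hR]
        norm_num
      · have hno3 : ∀ p ∈ pvTabla, PySem.Chars.isIn p.1 U = true → p.2 ≠ 3 := by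
          intro p hp hin h3'
          obtain ⟨s, hs, heq⟩ := List.mem_map.mp (pv_tabla_3 p hp h3')
          rw [← heq] at hin
          exact h3 (List.any_eq_true.mpr ⟨s, hs, hin⟩)
        have hR : pvScan U = 0 := by
          rcases pv_scan_cases U with h | ⟨p, hp, hpin, h⟩
          · exact h
          · rcases pv_tabla_vals p hp with hv | hv | hv
            · exact absurd hv (hno5 p hp hpin)
            · exact absurd hv (hno4 p hp hpin)
            · exact absurd hv (hno3 p hp hpin)
        rw [if_neg h1, if_neg h2, if_neg h3, hR]
        norm_num
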